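-- pv_equiv track=rewrite | github.com/MF07-Language-Programing/mf07-core-compiler | src/interpreter.py | _split_generic_args
-- ===== SOURCE A (Python) =====
-- from typing import Any, Dict, List, Optional
--
-- def _split_generic_args(arg_str: str) -> List[str]:
--     args: List[str] = []
--     current: List[str] = []
--     depth = 0
--     for ch in arg_str:
--         if ch == "<":
--             depth += 1
--             current.append(ch)
--         elif ch == ">":
--             depth -= 1
--             current.append(ch)
--         elif ch == "," and depth == 0:
--             args.append("".join(current).strip())
--             current = []
--         else:
--             current.append(ch)
--     if current:
--         args.append("".join(current).strip())
--     return args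
-- ===== SOURCE B (Python) =====
-- from typing import List
--
-- def _top_comma_index(s: str) -> int:
--     """Index of the first comma at angle-bracket depth 0, or -1."""
--     depth = 0
--     for i, ch in enumerate(s):
--         if ch == "<":
--             depth += 1
--         elif ch == ">":
--             depth -= 1
--         elif ch == "," and depth == 0:
--             return i
--     return -1
--
-- def _split_generic_args(arg_str: str) -> List[str]:
--     if not arg_str:
--         return []
--     i = _top_comma_index(arg_str)
--     if i < 0:
--         return [arg_str.strip()]
--     return [arg_str[:i].strip()] + _split_generic_args(arg_str[i + 1:])
-- ===== Notes on version B (the rewrite author's own statement) =====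
-- stated objective: alternative
-- what changed: Replaces the single accumulator loop (args/current/depth state machine with a post-loop flush) by a recursive decomposition: find the first top-level comma, emit the stripped head, recurse on the tail; the trailing-comma behaviour falls out of the empty-string base case.
import Mathlib
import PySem

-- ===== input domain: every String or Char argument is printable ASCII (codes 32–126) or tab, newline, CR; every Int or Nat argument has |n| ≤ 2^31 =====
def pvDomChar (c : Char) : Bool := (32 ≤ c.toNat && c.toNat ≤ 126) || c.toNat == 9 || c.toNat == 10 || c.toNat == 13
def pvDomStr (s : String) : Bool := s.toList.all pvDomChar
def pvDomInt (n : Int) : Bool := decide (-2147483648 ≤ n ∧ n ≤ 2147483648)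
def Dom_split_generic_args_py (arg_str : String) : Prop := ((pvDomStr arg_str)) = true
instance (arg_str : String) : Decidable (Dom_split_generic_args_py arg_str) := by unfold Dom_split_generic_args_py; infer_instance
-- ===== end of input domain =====

-- B replaces A's accumulator state machine by a recursive decomposition at the first
-- top-level comma; objective: alternative (same cost, different structure).


-- ===== PORT A =====
-- loop body of A: state (args, current, depth)
def pvStepA : List String × List Char × Int → Char → List String × List Char × Int
  | (args, cur, depth), ch =>
    if ch = '<' then (args, cur ++ [ch], depth + 1)
    else if ch = '>' then (args, cur ++ [ch], depth - 1)
    else if ch = ',' ∧ depth = 0 then (args ++ [String.ofList (PySem.Chars.strip cur)], [], depth)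
    else (args, cur ++ [ch], depth)

def split_generic_args_py (arg_str : String) : List String :=
  let st := arg_str.toList.foldl pvStepA ([], [], 0)
  if st.2.1 ≠ [] then st.1 ++ [String.ofList (PySem.Chars.strip st.2.1)] else st.1

-- ===== PORT B =====
-- Source B's _top_comma_index; Python's -1 is rendered as `none`
def pvTopComma : List Char → Int → Option Nat
  | [], _ => none
  | c :: rest, d =>
    if c = '<' then (pvTopComma rest (d + 1)).map (· + 1)
    else if c = '>' then (pvTopComma rest (d - 1)).map (· + 1)
    else if c = ',' ∧ d = 0 then some 0
    else (pvTopComma rest d).map (· + 1)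

theorem pvTopComma_lt {l : List Char} {d : Int} {i : Nat}
    (h : pvTopComma l d = some i) : i < l.length := by
  induction l generalizing d i with
  | nil => simp [pvTopComma] at h
  | cons c rest ih =>
    simp only [pvTopComma] at h
    split_ifs at h <;>
      first
        | (simp only [Option.map_eq_some_iff] at h
           obtain ⟨j, hj, rfl⟩ := h
           have := ih hj; simp; omega)
        | (simp_all; omega)

-- Source B's recursion on the string (arg_str[:i] = take i, arg_str[i+1:] = drop (i+1);
-- exact here since 0 ≤ i < length)
def pvAltGo (l : List Char) : List String :=
  if h0 : l = [] then []
  else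
    match h : pvTopComma l 0 with
    | none => [String.ofList (PySem.Chars.strip l)]
    | some i => String.ofList (PySem.Chars.strip (l.take i)) :: pvAltGo (l.drop (i + 1))
termination_by l.length
decreasing_by
  have h1 : 0 < l.length := List.length_pos_iff.mpr h0
  have h2 := pvTopComma_lt h
  simp only [List.length_drop]; omega

def split_generic_args_py_alt (arg_str : String) : List String := pvAltGo arg_str.toList

-- ===== PRECONDITION & SPEC =====
def Spec_split_generic_args_py (arg_str : String) (out : List String) : Prop := out = split_generic_args_py_alt arg_str
instance (arg_str : String) (out : List String) : Decidable (Spec_split_generic_args_py arg_str out) := by unfold Spec_split_generic_args_py; infer_instance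

-- ===== CLAIM (what is proved, stated in full; the proofs are below) =====
def Claim_equal_split_generic_args_py : Prop := ∀ (arg_str : String), Dom_split_generic_args_py arg_str → Spec_split_generic_args_py arg_str (split_generic_args_py arg_str)

-- ===== LEMMAS AND PROOFS =====

-- the args component of A's fold only ever grows on the right
theorem pvFold_args (l : List Char) (cur : List Char) (d : Int) (args : List String) :
    l.foldl pvStepA (args, cur, d) =
      (args ++ (l.foldl pvStepA ([], cur, d)).1, (l.foldl pvStepA ([], cur, d)).2) := by
  induction l generalizing args cur d with
  | nil => simp
  | cons c rest ih =>
    simp only [List.foldl_cons, pvStepA]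
    split_ifs with h1 h2 h3
    · exact ih _ _ _
    · exact ih _ _ _
    · rw [ih _ _ (args ++ [String.ofList (PySem.Chars.strip cur)]),
          ih _ _ ([] ++ [String.ofList (PySem.Chars.strip cur)])]
      simp
    · exact ih _ _ _

-- no top-level comma in l: the fold just appends l to current
theorem pvFold_none (l : List Char) (d : Int) (h : pvTopComma l d = none)
    (args : List String) (cur : List Char) :
    ∃ d', l.foldl pvStepA (args, cur, d) = (args, cur ++ l, d') := by
  induction l generalizing d cur with
  | nil => exact ⟨d, by simp⟩
  | cons c rest ih =>
    simp only [pvTopComma] at h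
    simp only [List.foldl_cons, pvStepA]
    split_ifs at h ⊢ with h1 h2 h3
    · simp only [Option.map_eq_none_iff] at h
      obtain ⟨d', hd⟩ := ih _ h _
      exact ⟨d', by rw [hd]; simp⟩
    · simp only [Option.map_eq_none_iff] at h
      obtain ⟨d', hd⟩ := ih _ h _
      exact ⟨d', by rw [hd]; simp⟩
    · simp only [Option.map_eq_none_iff] at h
      obtain ⟨d', hd⟩ := ih _ h _
      exact ⟨d', by rw [hd]; simp⟩

-- first top-level comma at i: the fold flushes strip(cur ++ take i) and restarts
theorem pvFold_some (l : List Char) (d : Int) (i : Nat) (h : pvTopComma l d = some i)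
    (args : List String) (cur : List Char) :
    l.foldl pvStepA (args, cur, d) =
      (l.drop (i + 1)).foldl pvStepA
        (args ++ [String.ofList (PySem.Chars.strip (cur ++ l.take i))], [], 0) := by
  induction l generalizing d i cur args with
  | nil => simp [pvTopComma] at h
  | cons c rest ih =>
    simp only [pvTopComma] at h
    simp only [List.foldl_cons, pvStepA]
    split_ifs at h ⊢ with h1 h2 h3
    · simp only [Option.map_eq_some_iff] at h
      obtain ⟨j, hj, rfl⟩ := h
      rw [ih _ _ hj]
      simp [List.append_assoc]
    · simp only [Option.map_eq_some_iff] at h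
      obtain ⟨j, hj, rfl⟩ := h
      rw [ih _ _ hj]
      simp [List.append_assoc]
    · simp only [Option.some.injEq] at h
      subst h
      simp [h3.2]
    · simp only [Option.map_eq_some_iff] at h
      obtain ⟨j, hj, rfl⟩ := h
      rw [ih _ _ hj]
      simp [List.append_assoc]

-- the whole of A, as a function of the character list
def pvRunA (l : List Char) : List String :=
  let st := l.foldl pvStepA ([], [], 0)
  if st.2.1 ≠ [] then st.1 ++ [String.ofList (PySem.Chars.strip st.2.1)] else st.1

theorem pvRunA_eq_altGo (n : Nat) : ∀ l : List Char, l.length ≤ n → pvRunA l = pvAltGo l := by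
  induction n with
  | zero =>
    intro l hl
    have : l = [] := List.eq_nil_of_length_eq_zero (Nat.le_zero.mp hl)
    subst this
    simp [pvRunA, pvAltGo]
  | succ n ih =>
    intro l hl
    by_cases h0 : l = []
    · subst h0; simp [pvRunA, pvAltGo]
    · rw [pvAltGo]
      simp only [h0, dite_false]
      cases hfc : pvTopComma l 0 with
      | none =>
        obtain ⟨d', hd⟩ := pvFold_none l 0 hfc [] []
        simp only [pvRunA, hd]
        simp [h0]
      | some i =>
        have hlt := pvTopComma_lt hfc
        have hrec : pvRunA (l.drop (i + 1)) = pvAltGo (l.drop (i + 1)) := by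
          apply ih
          have : 0 < l.length := List.length_pos_iff.mpr h0
          simp only [List.length_drop]; omega
        simp only [pvRunA] at hrec ⊢
        rw [pvFold_some l 0 i hfc [] []]
        simp only [List.nil_append]
        rw [pvFold_args (l.drop (i + 1)) [] 0 ([String.ofList (PySem.Chars.strip (l.take i))])]
        rw [← hrec]
        set st := (l.drop (i + 1)).foldl pvStepA ([], [], 0) with hst
        by_cases hc : st.2.1 = [] <;> simp [hc]

-- ===== VERDICT (by name: the statement is the Claim_ definition above) =====
theorem split_generic_args_py_spec : Claim_equal_split_generic_args_py := by
  intro arg_str _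
  unfold Spec_split_generic_args_py split_generic_args_py split_generic_args_py_alt
  exact pvRunA_eq_altGo arg_str.toList.length arg_str.toList le_rfl
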